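-- pv_equiv track=rewrite | github.com/IES-Rafael-Alberti/dam1-2425-ejercicios-u2-JoseLuis-S | src/excepciones/ej23_02.py | crear_serie
-- ===== SOURCE A (Python) =====
-- def crear_serie(num):
--     serie = ''
--
--     for i in range(1, num + 1, 2):
--         if num % 2 == 0:
--             if i == (num - 3):
--                 serie += str(i) + ' y '
--             elif i == (num - 1):
--                 serie += str(i)
--             else:
--                 serie += str(i) + ', '
--         else:
--             if i == (num - 1) or i == (num - 2):
--                 serie += str(i) + ' y '
--             elif i == num:
--                 serie += str(i)
--             else:
--                 serie += str(i) + ', '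
--
--     return serie
-- ===== SOURCE B (Python) =====
-- def crear_serie(num):
--     nums = [str(i) for i in range(1, num + 1, 2)]
--     if not nums:
--         return ''
--     if len(nums) == 1:
--         return nums[0]
--     return ', '.join(nums[:-1]) + ' y ' + nums[-1]
-- ===== Notes on version B (the rewrite author's own statement) =====
-- stated objective: simpler
-- what changed: B materializes the odd numbers once and assembles the result by length cases with ', '.join(nums[:-1]) + ' y ' + nums[-1], eliminating A's per-iteration parity split and per-position separator comparisons against num.
import Mathlib
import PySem

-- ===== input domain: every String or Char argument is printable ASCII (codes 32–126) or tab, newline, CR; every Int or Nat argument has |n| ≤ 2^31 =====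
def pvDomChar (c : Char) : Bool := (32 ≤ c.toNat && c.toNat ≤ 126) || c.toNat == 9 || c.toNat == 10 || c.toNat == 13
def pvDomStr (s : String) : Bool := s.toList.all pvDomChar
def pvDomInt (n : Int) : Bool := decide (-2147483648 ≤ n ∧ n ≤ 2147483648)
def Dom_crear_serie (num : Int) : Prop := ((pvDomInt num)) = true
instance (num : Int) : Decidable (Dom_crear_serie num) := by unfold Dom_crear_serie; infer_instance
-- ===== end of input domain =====

-- B builds the list of odd numbers once and joins it by length cases, instead of A's
-- per-iteration parity split and per-position separator comparisons (objective: simpler).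

-- ===== PORT A =====
def crear_serie (num : Int) : String :=
  (PySem.List.pyRange 1 (num + 1) 2).foldl (fun serie i =>
    if PySem.Int.mod num 2 = 0 then
      if i = num - 3 then serie ++ PySem.Int.toStr i ++ " y "
      else if i = num - 1 then serie ++ PySem.Int.toStr i
      else serie ++ PySem.Int.toStr i ++ ", "
    else
      if i = num - 1 ∨ i = num - 2 then serie ++ PySem.Int.toStr i ++ " y "
      else if i = num then serie ++ PySem.Int.toStr i
      else serie ++ PySem.Int.toStr i ++ ", ") ""

-- ===== PORT B =====
-- port of Source B; the length-case assembly is the helper pvJoinCases; nums[-1] is total in its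
-- branch (the match guarantees nonemptiness), so the Option from pyGet? is discharged with getD "".
def pvJoinCases (nums : List String) : String :=
  match nums with
  | [] => ""
  | [x] => x
  | x :: y :: rest =>
      PySem.Str.join ", " (PySem.List.slice (x :: y :: rest) none (some (-1)))
        ++ " y " ++ ((PySem.List.pyGet? (x :: y :: rest) (-1)).getD "")

def crear_serie_alt (num : Int) : String :=
  pvJoinCases ((PySem.List.pyRange 1 (num + 1) 2).map PySem.Int.toStr)

-- ===== PRECONDITION & SPEC =====
def Spec_crear_serie (num : Int) (out : String) : Prop := out = crear_serie_alt num
instance (num : Int) (out : String) : Decidable (Spec_crear_serie num out) := by unfold Spec_crear_serie; infer_instance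

-- ===== CLAIM (what is proved, stated in full; the proofs are below) =====
def Claim_equal_crear_serie : Prop := ∀ (num : Int), Dom_crear_serie num → Spec_crear_serie num (crear_serie num)

-- ===== LEMMAS AND PROOFS =====

-- the k-th odd number, as a string
def pvF (k : Nat) : String := PySem.Int.toStr (1 + 2 * (k : Int))

-- A's output as a function of the count K of odd numbers
def pvSerieF (K : Nat) : String :=
  (List.range K).foldl (fun s k =>
    if k + 2 = K then s ++ pvF k ++ " y "
    else if k + 1 = K then s ++ pvF k
    else s ++ pvF k ++ ", ") ""

-- B's output as a function of K
def pvSerieG : Nat → String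
  | 0 => ""
  | 1 => pvF 0
  | (m+2) => PySem.Str.join ", " ((List.range (m+1)).map pvF) ++ " y " ++ pvF (m+1)

def pvChunk (m : Nat) : String :=
  (List.range m).foldl (fun s k => s ++ pvF k ++ ", ") ""

theorem pv_range_odds (num : Int) (h : 1 ≤ num) :
    PySem.List.pyRange 1 (num + 1) 2
      = (List.range ((num + 1) / 2).toNat).map (fun (k : Nat) => 1 + 2 * (k : Int)) := by
  rw [PySem.List.pyRange_of_pos 1 (num + 1) (by norm_num), if_pos (by omega)]
  have h2 : num + 1 - 1 + 2 - 1 = num + 1 := by ring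
  rw [h2]

theorem pv_chunk_succ (m : Nat) : pvChunk (m + 1) = pvChunk m ++ pvF m ++ ", " := by
  simp [pvChunk, List.range_succ]

theorem pv_join_chars_append_singleton (sep : List Char) (l : List (List Char)) (x : List Char)
    (h : l ≠ []) :
    PySem.Chars.join sep (l ++ [x]) = PySem.Chars.join sep l ++ sep ++ x := by
  induction l with
  | nil => exact absurd rfl h
  | cons p t ih =>
    cases t with
    | nil => simp [PySem.Chars.join_cons_cons, PySem.Chars.join_singleton]
    | cons q r =>
      have ih' := ih (by simp)
      rw [List.cons_append] at ih'
      simp only [List.cons_append, PySem.Chars.join_cons_cons, ih', List.append_assoc]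

theorem pv_join_append_singleton (sep : String) (l : List String) (x : String) (h : l ≠ []) :
    PySem.Str.join sep (l ++ [x]) = PySem.Str.join sep l ++ sep ++ x := by
  rw [← String.toList_inj]
  simp only [PySem.Str.toList_join, String.toList_append, List.map_append, List.map_cons,
    List.map_nil]
  rw [pv_join_chars_append_singleton sep.toList (l.map String.toList) x.toList (by simpa using h)]

theorem pv_chunk_join (m : Nat) :
    pvChunk m ++ pvF m = PySem.Str.join ", " ((List.range (m + 1)).map pvF) := by
  induction m with
  | zero =>
    rw [← String.toList_inj]
    simp [pvChunk, PySem.Str.toList_join, PySem.Chars.join_singleton]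
  | succ m ih =>
    rw [pv_chunk_succ, List.range_succ, List.map_append, List.map_singleton,
      pv_join_append_singleton _ _ _ (by simp), ← ih]

theorem pv_serieF_eq_G (K : Nat) : pvSerieF K = pvSerieG K := by
  match K with
  | 0 => rfl
  | 1 => simp [pvSerieF, pvSerieG, List.range_succ]
  | (m+2) =>
    have hsplit : List.range (m + 2) = List.range m ++ [m, m+1] := by
      rw [List.range_succ, List.range_succ]; simp
    have hchunk :
        (List.range m).foldl (fun s k =>
          if k + 2 = m + 2 then s ++ pvF k ++ " y "
          else if k + 1 = m + 2 then s ++ pvF k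
          else s ++ pvF k ++ ", ") "" = pvChunk m := by
      apply PySem.List.foldl_congr_mem
      intro acc k hk
      have hk' : k < m := List.mem_range.mp hk
      rw [if_neg (by omega), if_neg (by omega)]
    rw [pvSerieF, hsplit, List.foldl_append, hchunk]
    simp only [List.foldl_cons, List.foldl_nil, if_true,
      if_neg (show ¬ m + 1 + 2 = m + 2 by omega)]
    simp only [pvSerieG]
    rw [← pv_chunk_join]

theorem pv_A_eq (num : Int) (h : 1 ≤ num) :
    crear_serie num = pvSerieF ((num + 1) / 2).toNat := by
  rw [crear_serie, pv_range_odds num h, List.foldl_map]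
  apply PySem.List.foldl_congr_mem
  intro acc k hk
  have hk' : k < ((num + 1) / 2).toNat := List.mem_range.mp hk
  have hK : 2 * ((((num + 1) / 2).toNat : Int)) = num ∨
      2 * ((((num + 1) / 2).toNat : Int)) = num + 1 := by omega
  have hmod : PySem.Int.mod num 2 = num % 2 := by
    rw [PySem.Int.mod, Int.fmod_eq_emod]; simp
  by_cases hpar : num % 2 = 0
  · rw [hmod, if_pos hpar]
    simp only [pvF]
    split_ifs <;> first | rfl | (exfalso; omega)
  · rw [hmod, if_neg hpar]
    simp only [pvF]
    split_ifs with h1 h2 h3 h4 h5 <;> first | rfl | (exfalso; omega)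

theorem pv_alt_body (l : List String) (hl : 2 ≤ l.length) :
    pvJoinCases l
      = PySem.Str.join ", " l.dropLast ++ " y " ++ (l.getLast?.getD "") := by
  match l with
  | [] => simp at hl
  | [a] => simp at hl
  | a :: b :: t =>
    simp [pvJoinCases, PySem.List.slice_to_neg_one, PySem.List.pyGet?_neg_one]

theorem pv_B_eq (num : Int) (h : 1 ≤ num) :
    crear_serie_alt num = pvSerieG ((num + 1) / 2).toNat := by
  rw [crear_serie_alt, pv_range_odds num h, List.map_map]
  have hmap : (PySem.Int.toStr ∘ fun k : Nat => 1 + 2 * (k : Int)) = pvF := by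
    funext k; rfl
  rw [hmap]
  have hK1 : 1 ≤ ((num + 1) / 2).toNat := by omega
  match hKm : ((num + 1) / 2).toNat with
  | 0 => omega
  | 1 => simp [pvJoinCases, pvSerieG, List.range_succ]
  | (m+2) =>
    rw [pv_alt_body _ (by simp)]
    have hsplit : (List.range (m + 2)).map pvF = ((List.range (m + 1)).map pvF) ++ [pvF (m + 1)] := by
      rw [List.range_succ, List.map_append, List.map_singleton]
    rw [hsplit, List.dropLast_concat, List.getLast?_concat]
    rfl

theorem pv_empty (num : Int) (h : num < 1) : crear_serie num = "" ∧ crear_serie_alt num = "" := by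
  have hr : PySem.List.pyRange 1 (num + 1) 2 = [] := by
    rw [PySem.List.pyRange_of_pos 1 (num + 1) (by norm_num), if_neg (by omega)]
    simp
  constructor
  · rw [crear_serie, hr]; rfl
  · rw [crear_serie_alt, hr]; rfl

-- ===== VERDICT (by name: the statement is the Claim_ definition above) =====
theorem crear_serie_spec : Claim_equal_crear_serie := by
  intro num _
  unfold Spec_crear_serie
  by_cases h : 1 ≤ num
  · rw [pv_A_eq num h, pv_B_eq num h, pv_serieF_eq_G]
  · obtain ⟨h1, h2⟩ := pv_empty num (by omega)
    rw [h1, h2]
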